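-- pv_equiv track=rewrite | github.com/kiteday/Algorithm | week21/땅따먹기_Nunu-0.py | solution
-- ===== SOURCE A (Python) =====
-- def solution(land):
--     answer = 0
--
--     for i in range(1, len(land)): # 세로
--         for j in range(len(land[i])): # 가로
--             maxi = 0
--             for k in range(len(land[i - 1])):
--                 if j != k: # 같은 행에 있는 것 빼고 가장 큰 숫자 찾기
--                     maxi = max(land[i - 1][k], maxi)
--             land[i][j] += maxi
--
--     answer = max(land[-1])
--
--     return answer
-- ===== SOURCE B (Python) =====
-- def solution(land):
--     prev = land[0]
--     for row in land[1:]: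
--         m1 = i1 = m2 = None
--         for k, v in enumerate(prev):
--             if m1 is None or v > m1:
--                 m2 = m1
--                 m1 = v
--                 i1 = k
--             elif m2 is None or v > m2:
--                 m2 = v
--         cur = []
--         for j, v in enumerate(row):
--             best = m2 if j == i1 else m1
--             if best is None or best < 0:
--                 best = 0
--             cur.append(v + best)
--         prev = cur
--     return max(prev)
-- ===== Notes on version B (the rewrite author's own statement) =====
-- stated objective: faster
-- what changed: Instead of rescanning the whole previous row for every cell (max over all k != j), B scans each previous row once to find its maximum, that maximum's first index and the second maximum, and each cell then picks the right one in O(1).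
import Mathlib
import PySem

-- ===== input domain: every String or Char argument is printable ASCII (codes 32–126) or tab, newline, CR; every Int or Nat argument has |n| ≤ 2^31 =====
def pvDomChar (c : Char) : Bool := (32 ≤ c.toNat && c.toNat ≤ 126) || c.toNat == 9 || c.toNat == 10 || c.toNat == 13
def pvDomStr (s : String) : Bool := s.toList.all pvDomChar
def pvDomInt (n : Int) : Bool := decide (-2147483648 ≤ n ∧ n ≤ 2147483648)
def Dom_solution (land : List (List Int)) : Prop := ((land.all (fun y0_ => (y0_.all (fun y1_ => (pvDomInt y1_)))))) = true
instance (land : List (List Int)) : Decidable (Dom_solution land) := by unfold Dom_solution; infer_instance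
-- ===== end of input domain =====

-- B replaces A's per-cell rescan of the previous row by one top-two scan per row.
-- Python A mutates `land` in place (B does not); the equivalence proved here is about the return value only.

-- ===== PORT A =====
-- 'maxi' loop: for k in range(len(land[i-1])): if j != k: maxi = max(land[i-1][k], maxi)
def pvMaxiA (prev : List Int) (j : Int) : Int :=
  (PySem.List.pyRange 0 (PySem.List.len prev) 1).foldl
    (fun maxi k => if j ≠ k then max (PySem.List.pyGetD prev k 0) maxi else maxi) 0

-- inner j-loop over row i ('land[i][j] += maxi'); land[i-1] is not mutated while row i is processed
def pvRowA (prev row : List Int) : List Int :=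
  (PySem.List.pyRange 0 (PySem.List.len row) 1).foldl
    (fun r j => PySem.List.pySetD r j (PySem.List.pyGetD r j 0 + pvMaxiA prev j)) row

def solution (land : List (List Int)) : Int :=
  let land2 := (PySem.List.pyRange 1 (PySem.List.len land) 1).foldl
    (fun ld i => PySem.List.pySetD ld i
        (pvRowA (PySem.List.pyGetD ld (i - 1) []) (PySem.List.pyGetD ld i []))) land
  (PySem.List.max? (PySem.List.pyGetD land2 (-1) []) (fun y => y)).getD 0

-- ===== PORT B =====
-- top-two scan of prev: m1 = max, i1 = its (first) index, m2 = max of the rest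
def pvStepTop (s : Option Int × Option Int × Option Int) (kv : Int × Int) :
    Option Int × Option Int × Option Int :=
  match s.1 with
  | none => (some kv.2, some kv.1, s.1)
  | some a =>
    if a < kv.2 then (some kv.2, some kv.1, s.1)
    else
      match s.2.2 with
      | none => (s.1, s.2.1, some kv.2)
      | some b => if b < kv.2 then (s.1, s.2.1, some kv.2) else s

def pvTopTwo (prev : List Int) : Option Int × Option Int × Option Int :=
  (PySem.List.enumerate prev 0).foldl pvStepTop (none, none, none)

-- 'if best is None or best < 0: best = 0' on an optional int
def pvClamp (best : Option Int) : Int :=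
  match best with
  | none => 0
  | some b => if b < 0 then 0 else b

def pvRowB (prev row : List Int) : List Int :=
  let s := pvTopTwo prev
  (PySem.List.enumerate row 0).foldl
    (fun cur jv => cur ++ [jv.2 + pvClamp (if s.2.1 = some jv.1 then s.2.2 else s.1)]) []

def solution_alt (land : List (List Int)) : Int :=
  let prev0 := PySem.List.pyGetD land 0 []
  let last := (PySem.List.slice land (some 1) none).foldl (fun prev row => pvRowB prev row) prev0
  (PySem.List.max? last (fun y => y)).getD 0

-- ===== PRECONDITION & SPEC =====
-- Pre_ excludes exactly the inputs where Python raises: empty land (IndexError on land[0] / land[-1])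
-- and an empty last row (ValueError on max of an empty list).
def Pre_solution (land : List (List Int)) : Prop := land ≠ [] ∧ land.getLastD [] ≠ []
instance (land : List (List Int)) : Decidable (Pre_solution land) := by unfold Pre_solution; infer_instance

def pvWitness_solution : List (List Int) := [[1, 2], [3, 4]]

def Spec_solution (land : List (List Int)) (out : Int) : Prop := out = solution_alt land
instance (land : List (List Int)) (out : Int) : Decidable (Spec_solution land out) := by unfold Spec_solution; infer_instance

-- ===== CLAIM (what is proved, stated in full; the proofs are below) =====
def Claim_equal_solution : Prop := ∀ (land : List (List Int)), Dom_solution land → Pre_solution land → Spec_solution land (solution land)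

-- ===== LEMMAS AND PROOFS =====

-- the value A's maxi-loop ends at, read off a top-two state
def pvSel (s : Option Int × Option Int × Option Int) (j : Int) : Int :=
  max 0 ((if s.2.1 = some j then s.2.2 else s.1).getD 0)

-- invariant of the top-two state w.r.t. the index/value pairs still to come
def pvInv (s : Option Int × Option Int × Option Int) (L : List (Int × Int)) : Prop :=
  (∀ i, s.2.1 = some i → ∀ kv ∈ L, kv.1 ≠ i) ∧
  (s.1 = none → s.2.1 = none ∧ s.2.2 = none) ∧
  (∀ a b, s.1 = some a → s.2.2 = some b → b ≤ a)

lemma pvStep_sel (s : Option Int × Option Int × Option Int) (k v j : Int)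
    (hk : ∀ i, s.2.1 = some i → k ≠ i)
    (h0 : s.1 = none → s.2.1 = none ∧ s.2.2 = none)
    (h2 : ∀ a b, s.1 = some a → s.2.2 = some b → b ≤ a) :
    pvSel (pvStepTop s (k, v)) j = if j ≠ k then max v (pvSel s j) else pvSel s j := by
  obtain ⟨m1, i1, m2⟩ := s
  cases m1 with
  | none =>
    obtain ⟨h1', h2'⟩ := h0 rfl
    subst h1'; subst h2'
    simp only [pvStepTop, pvSel]
    split_ifs <;> simp_all <;> omega
  | some a =>
    have hba : ∀ b, m2 = some b → b ≤ a := fun b hb => h2 a b rfl hb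
    have hki : ∀ i, i1 = some i → k ≠ i := hk
    clear hk h0 h2
    cases i1 with
    | none =>
      cases m2 with
      | none =>
        simp only [pvStepTop, pvSel]
        split_ifs <;> simp_all <;> omega
      | some b =>
        have := hba b rfl
        simp only [pvStepTop, pvSel]
        split_ifs <;> simp_all <;> omega
    | some i =>
      have hki' : k ≠ i := hki i rfl
      cases m2 with
      | none =>
        simp only [pvStepTop, pvSel]
        split_ifs <;> simp_all <;> omega
      | some b =>
        have := hba b rfl
        simp only [pvStepTop, pvSel]
        split_ifs <;> simp_all <;> omega

lemma pvStepTop_i1 (s : Option Int × Option Int × Option Int) (kv : Int × Int) :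
    (pvStepTop s kv).2.1 = s.2.1 ∨ (pvStepTop s kv).2.1 = some kv.1 := by
  obtain ⟨m1, i1, m2⟩ := s
  cases m1 <;> cases m2 <;> simp only [pvStepTop] <;> (try split_ifs) <;> simp

lemma pvStepTop_m1 (s : Option Int × Option Int × Option Int) (kv : Int × Int) :
    (pvStepTop s kv).1 ≠ none := by
  obtain ⟨m1, i1, m2⟩ := s
  cases m1 <;> cases m2 <;> simp only [pvStepTop] <;> (try split_ifs) <;> simp

lemma pvStepTop_le (s : Option Int × Option Int × Option Int) (kv : Int × Int)
    (h0 : s.1 = none → s.2.2 = none)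
    (h2 : ∀ a b, s.1 = some a → s.2.2 = some b → b ≤ a) :
    ∀ a b, (pvStepTop s kv).1 = some a → (pvStepTop s kv).2.2 = some b → b ≤ a := by
  obtain ⟨m1, i1, m2⟩ := s
  cases m1 <;> cases m2 <;> simp only [pvStepTop] <;> (try split_ifs) <;> simp_all <;> omega

lemma pvCoupled (L : List (Int × Int)) : ∀ s, pvInv s L →
    L.Pairwise (fun p q => p.1 ≠ q.1) → ∀ j,
    L.foldl (fun m kv => if j ≠ kv.1 then max kv.2 m else m) (pvSel s j)
      = pvSel (L.foldl pvStepTop s) j := by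
  induction L with
  | nil => intro s _ _ j; rfl
  | cons kv L ih =>
    intro s hInv hPw j
    obtain ⟨k, v⟩ := kv
    obtain ⟨hPw1, hPw2⟩ := List.pairwise_cons.mp hPw
    obtain ⟨hI1, hI2, hI3⟩ := hInv
    simp only [List.foldl_cons]
    rw [show (if j ≠ k then max v (pvSel s j) else pvSel s j)
          = pvSel (pvStepTop s (k, v)) j from
        (pvStep_sel s k v j (fun i hi => hI1 i hi (k, v) List.mem_cons_self)
          hI2 hI3).symm]
    exact ih (pvStepTop s (k, v))
      ⟨fun i hi kv' hkv' => by
        rcases pvStepTop_i1 s (k, v) with h | h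
        · exact hI1 i (h ▸ hi) kv' (List.mem_cons_of_mem _ hkv')
        · have hik : (k : Int) = i := by
            rw [hi] at h
            exact Option.some.inj h.symm
          exact fun he => (hPw1 kv' hkv') (by simp [he, hik])
        ,
        fun h => absurd h (pvStepTop_m1 s (k, v)),
        pvStepTop_le s (k, v) (fun h => (hI2 h).2) hI3⟩
      hPw2 j

lemma pvMaxiA_eq (prev : List Int) (j : Int) : pvMaxiA prev j = pvSel (pvTopTwo prev) j := by
  have h := pvCoupled (PySem.List.enumerate prev 0) (none, none, none)
      ⟨by simp, by simp, by simp⟩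
      ((PySem.List.pairwise_lt_enumerate prev 0).imp (fun h => ne_of_lt h)) j
  have h0 : pvSel (none, none, none) j = 0 := by simp [pvSel]
  rw [h0] at h
  rw [pvMaxiA, pvTopTwo, ← h, PySem.List.enumerate_eq_map_pyRange (d := 0), List.foldl_map]

lemma pvSetAppend {α : Type} (R : List α) (B : List α) (v : α) :
    (R ++ B).set R.length v = R ++ B.set 0 v := by
  induction R with
  | nil => rfl
  | cons a R ih => simp [ih]

lemma pvGetDAppend {α : Type} (R B : List α) (d : α) :
    (R ++ B).getD R.length d = B.getD 0 d := by
  induction R with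
  | nil => rfl
  | cons a R ih => simpa using ih

lemma pvRowA_prefix (prev row : List Int) (n : Nat) (hn : n ≤ row.length) :
    (PySem.List.pyRange 0 (n : Int) 1).foldl
      (fun r j => PySem.List.pySetD r j (PySem.List.pyGetD r j 0 + pvMaxiA prev j)) row
    = (List.range n).map (fun i => row.getD i 0 + pvMaxiA prev (i : Int)) ++ row.drop n := by
  induction n with
  | zero =>
    rw [PySem.List.pyRange_one_eq_nil (by norm_num)]
    simp
  | succ n ih =>
    have hn' : n ≤ row.length := Nat.le_of_succ_le hn
    have hlt : n < row.length := hn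
    rw [show ((n + 1 : Nat) : Int) = (n : Int) + 1 by push_cast; ring,
        PySem.List.pyRange_one_succ_right (by exact_mod_cast Nat.zero_le n),
        List.foldl_append, ih hn']
    set R := (List.range n).map (fun i => row.getD i 0 + pvMaxiA prev (i : Int)) with hR
    have hRlen : R.length = n := by simp [hR]
    have hdrop : row.drop n = row[n] :: row.drop (n + 1) := List.drop_eq_getElem_cons hlt
    simp only [List.foldl_cons, List.foldl_nil]
    rw [PySem.List.pyGetD_natCast, PySem.List.pySetD_natCast, hdrop]
    have hget : (R ++ row[n] :: row.drop (n + 1)).getD n 0 = row[n] := by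
      have h := pvGetDAppend R (row[n] :: row.drop (n + 1)) 0
      rw [hRlen] at h
      exact h
    have hset : (R ++ row[n] :: row.drop (n + 1)).set n (row[n] + pvMaxiA prev (n : Int))
        = R ++ (row[n] + pvMaxiA prev (n : Int)) :: row.drop (n + 1) := by
      have h := pvSetAppend R (row[n] :: row.drop (n + 1)) (row[n] + pvMaxiA prev (n : Int))
      rw [hRlen] at h
      exact h
    rw [hget, hset, List.range_succ, List.map_append, List.append_assoc]
    simp [hR, List.getD_eq_getElem?_getD, List.getElem?_eq_getElem hlt]

lemma pvClamp_sel (s : Option Int × Option Int × Option Int) (j : Int) :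
    pvClamp (if s.2.1 = some j then s.2.2 else s.1) = pvSel s j := by
  unfold pvClamp pvSel
  cases (if s.2.1 = some j then s.2.2 else s.1) with
  | none => simp
  | some b =>
    simp only [Option.getD_some]
    split_ifs <;> omega

lemma pvRowB_eq (prev row : List Int) :
    pvRowB prev row = (List.range row.length).map (fun i => row.getD i 0 + pvMaxiA prev (i : Int)) := by
  show (PySem.List.enumerate row 0).foldl
      (fun cur jv => cur ++ [jv.2 + pvClamp
        (if (pvTopTwo prev).2.1 = some jv.1 then (pvTopTwo prev).2.2 else (pvTopTwo prev).1)]) []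
    = (List.range row.length).map (fun i => row.getD i 0 + pvMaxiA prev (i : Int))
  rw [PySem.List.foldl_append_singleton_eq_map]
  apply List.ext_getElem (by simp)
  intro i h1 h2
  simp only [List.nil_append, List.getElem_map, PySem.List.getElem_enumerate, zero_add,
    List.getElem_range]
  rw [pvClamp_sel (pvTopTwo prev) (i : Int), ← pvMaxiA_eq]
  simp [List.getD_eq_getElem?_getD, List.getElem?_eq_getElem (by simpa using h1)]

lemma pvRowAB (prev row : List Int) : pvRowA prev row = pvRowB prev row := by
  rw [pvRowB_eq, pvRowA]
  have := pvRowA_prefix prev row row.length le_rfl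
  simp only [List.drop_length, List.append_nil] at this
  simpa using this

-- functional form of A's outer loop
def pvScan (p : List Int) : List (List Int) → List (List Int)
  | [] => []
  | x :: xs => pvRowA p x :: pvScan (pvRowA p x) xs

lemma pvOuter (rest : List (List Int)) : ∀ (done : List (List Int)) (p : List Int),
    (PySem.List.pyRange ((done.length : Int) + 1) ((done.length : Int) + 1 + (rest.length : Int)) 1).foldl
      (fun ld i => PySem.List.pySetD ld i
          (pvRowA (PySem.List.pyGetD ld (i - 1) []) (PySem.List.pyGetD ld i []))) (done ++ p :: rest)
    = done ++ p :: pvScan p rest := by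
  induction rest with
  | nil =>
    intro done p
    rw [show ((done.length : Int) + 1 + (([] : List (List Int)).length : Int)) = (done.length : Int) + 1 by simp,
        PySem.List.pyRange_one_eq_nil le_rfl]
    rfl
  | cons x xs ih =>
    intro done p
    rw [PySem.List.pyRange_one_cons (by push_cast [List.length_cons]; omega)]
    simp only [List.foldl_cons]
    have g1 : PySem.List.pyGetD (done ++ p :: x :: xs) ((done.length : Int) + 1 - 1) [] = p := by
      rw [show (done.length : Int) + 1 - 1 = ((done.length : Nat) : Int) by omega,
          PySem.List.pyGetD_natCast, pvGetDAppend]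
      rfl
    have g2 : PySem.List.pyGetD (done ++ p :: x :: xs) ((done.length : Int) + 1) [] = x := by
      rw [show (done.length : Int) + 1 = (((done ++ [p]).length : Nat) : Int) by push_cast; simp,
          PySem.List.pyGetD_natCast,
          show done ++ p :: x :: xs = (done ++ [p]) ++ x :: xs by simp,
          pvGetDAppend]
      rfl
    have s1 : PySem.List.pySetD (done ++ p :: x :: xs) ((done.length : Int) + 1) (pvRowA p x)
        = (done ++ [p]) ++ pvRowA p x :: xs := by
      rw [show (done.length : Int) + 1 = (((done ++ [p]).length : Nat) : Int) by push_cast; simp,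
          PySem.List.pySetD_natCast,
          show done ++ p :: x :: xs = (done ++ [p]) ++ x :: xs by simp,
          pvSetAppend]
      rfl
    rw [g1, g2, s1]
    have hih := ih (done ++ [p]) (pvRowA p x)
    rw [show (((done ++ [p]).length : Nat) : Int) + 1 = (done.length : Int) + 1 + 1 by
          push_cast [List.length_append, List.length_cons, List.length_nil]; omega] at hih
    rw [show (done.length : Int) + 1 + 1 + (xs.length : Int) = (done.length : Int) + 1 + ((x :: xs).length : Int) by
          push_cast [List.length_cons]; omega] at hih
    rw [hih]
    simp [pvScan]

lemma pvLast_scan (rest : List (List Int)) : ∀ (p : List Int) (h : p :: pvScan p rest ≠ []),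
    (p :: pvScan p rest).getLast h = rest.foldl pvRowA p := by
  induction rest with
  | nil => intro p h; rfl
  | cons x xs ih =>
    intro p h
    show (p :: pvRowA p x :: pvScan (pvRowA p x) xs).getLast (by simp)
        = List.foldl pvRowA p (x :: xs)
    rw [List.getLast_cons (by simp : pvRowA p x :: pvScan (pvRowA p x) xs ≠ [])]
    simp only [List.foldl_cons]
    exact ih (pvRowA p x) (by simp)

-- ===== VERDICT (by name: the statement is the Claim_ definition above) =====
theorem solution_spec : Claim_equal_solution := by
  unfold Claim_equal_solution
  intro land _ hPre
  unfold Spec_solution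
  obtain ⟨hne, -⟩ := hPre
  cases land with
  | nil => exact absurd rfl hne
  | cons r rest =>
    simp only [solution, solution_alt]
    have hout := pvOuter rest [] r
    simp only [List.length_nil, Nat.cast_zero, zero_add, List.nil_append] at hout
    rw [show PySem.List.pyRange 1 (PySem.List.len (r :: rest)) 1
          = PySem.List.pyRange 1 (1 + (rest.length : Int)) 1 by
        rw [PySem.List.len_eq]; push_cast; simp; ring_nf,
        hout,
        PySem.List.pyGetD_neg_one (r :: pvScan r rest) [] (List.cons_ne_nil r (pvScan r rest)),
        pvLast_scan rest r (by simp),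
        PySem.List.pyGetD_zero_cons,
        PySem.List.slice_from_one,
        show (r :: rest).tail = rest from rfl,
        show (fun prev row => pvRowB prev row) = pvRowB from rfl,
        show pvRowB = pvRowA from funext₂ fun p w => (pvRowAB p w).symm]
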